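-- pv_equiv track=rewrite | github.com/nju-websoft/SkeletonKBQA | kbcqa/method_ir/grounding/grounding_online_ir/ir_online_utils.py | get_literal_and_entity_from_list
-- ===== SOURCE A (Python) =====
-- def get_literal_and_entity_from_list(entity_or_literal_with_type_list):
--     e1 = None
--     l2 = None
--     for entity_or_literal_with_type in entity_or_literal_with_type_list:
--         if entity_or_literal_with_type[1] == 'literal':
--             l2 = entity_or_literal_with_type[0]
--         elif entity_or_literal_with_type[1] == 'entity':
--             e1 = entity_or_literal_with_type[0]
--     return e1, l2
-- ===== SOURCE B (Python) =====
-- def get_literal_and_entity_from_list(entity_or_literal_with_type_list):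
--     e1 = next((x[0] for x in reversed(entity_or_literal_with_type_list) if x[1] == 'entity'), None)
--     l2 = next((x[0] for x in reversed(entity_or_literal_with_type_list) if x[1] == 'literal'), None)
--     return e1, l2
-- ===== Notes on version B (the rewrite author's own statement) =====
-- stated objective: idiomatic
-- what changed: Replaces the single forward overwrite loop with two targeted reverse-order scans that each take the first match of its type (last-entity / last-literal), returning immediately via next().
import Mathlib
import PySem

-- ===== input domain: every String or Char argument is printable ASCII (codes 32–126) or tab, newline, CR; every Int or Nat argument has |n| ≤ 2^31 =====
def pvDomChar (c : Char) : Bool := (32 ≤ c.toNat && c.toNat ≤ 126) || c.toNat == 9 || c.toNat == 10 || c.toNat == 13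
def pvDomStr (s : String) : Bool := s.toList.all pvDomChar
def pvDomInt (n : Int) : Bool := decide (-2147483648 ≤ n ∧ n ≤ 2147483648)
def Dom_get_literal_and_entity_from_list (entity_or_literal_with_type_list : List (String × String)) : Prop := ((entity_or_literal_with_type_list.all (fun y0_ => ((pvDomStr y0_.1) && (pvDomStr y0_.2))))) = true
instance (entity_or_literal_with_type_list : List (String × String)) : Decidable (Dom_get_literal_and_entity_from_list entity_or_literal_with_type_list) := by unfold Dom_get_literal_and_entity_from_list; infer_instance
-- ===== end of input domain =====

-- B: two targeted reverse scans (first match per type) instead of one forward overwrite loop; idiomatic, same cost.\n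
-- ===== PORT A =====
def get_literal_and_entity_from_list (entity_or_literal_with_type_list : List (String × String)) : Option String × Option String :=
  entity_or_literal_with_type_list.foldl
    (fun (st : Option String × Option String) x =>
      if x.2 = "literal" then (st.1, some x.1)
      else if x.2 = "entity" then (some x.1, st.2)
      else st)
    (none, none)

-- ===== PORT B =====
-- B: first match of each type scanning the list in reverse (two targeted passes).
def pvFindLast (t : String) (xs : List (String × String)) : Option String :=
  xs.reverse.findSome? (fun x => if x.2 = t then some x.1 else none)

def get_literal_and_entity_from_list_alt (entity_or_literal_with_type_list : List (String × String)) : Option String × Option String :=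
  (pvFindLast "entity" entity_or_literal_with_type_list,
   pvFindLast "literal" entity_or_literal_with_type_list)

-- ===== PRECONDITION & SPEC =====
def Spec_get_literal_and_entity_from_list (entity_or_literal_with_type_list : List (String × String)) (out : Option String × Option String) : Prop := out = get_literal_and_entity_from_list_alt entity_or_literal_with_type_list
instance (entity_or_literal_with_type_list : List (String × String)) (out : Option String × Option String) : Decidable (Spec_get_literal_and_entity_from_list entity_or_literal_with_type_list out) := by unfold Spec_get_literal_and_entity_from_list; infer_instance

-- ===== CLAIM (what is proved, stated in full; the proofs are below) =====
def Claim_equal_get_literal_and_entity_from_list : Prop := ∀ (entity_or_literal_with_type_list : List (String × String)), Dom_get_literal_and_entity_from_list entity_or_literal_with_type_list → Spec_get_literal_and_entity_from_list entity_or_literal_with_type_list (get_literal_and_entity_from_list entity_or_literal_with_type_list)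

-- ===== LEMMAS AND PROOFS =====

theorem pvFindLast_cons (t : String) (x : String × String) (xs : List (String × String)) :
    pvFindLast t (x :: xs) = (pvFindLast t xs).or (if x.2 = t then some x.1 else none) := by
  simp [pvFindLast, List.findSome?_append]

theorem loop_eq (xs : List (String × String)) : ∀ e l : Option String,
    xs.foldl
      (fun (st : Option String × Option String) x =>
        if x.2 = "literal" then (st.1, some x.1)
        else if x.2 = "entity" then (some x.1, st.2)
        else st)
      (e, l)
    = ((pvFindLast "entity" xs).or e, (pvFindLast "literal" xs).or l) := by
  induction xs with
  | nil => intro e l; simp [pvFindLast]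
  | cons x xs ih =>
      intro e l
      simp only [List.foldl_cons, pvFindLast_cons, Option.or_assoc]
      by_cases h1 : x.2 = "literal"
      · have h2 : ¬ x.2 = "entity" := by simp [h1]
        simp [h1, ih, Option.or]
      · by_cases h2 : x.2 = "entity"
        · simp [h2, ih, Option.or]
        · simp [h1, h2, ih, Option.or]

-- ===== VERDICT (by name: the statement is the Claim_ definition above) =====
theorem get_literal_and_entity_from_list_spec : Claim_equal_get_literal_and_entity_from_list := by
  intro xs _
  unfold Spec_get_literal_and_entity_from_list get_literal_and_entity_from_list get_literal_and_entity_from_list_alt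
  simp [loop_eq]
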